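-- pv_equiv track=rewrite | github.com/pypi-data/pypi-code-84 | seanalgorithms3/seanalgorithms3-0.4-py3-none-any.whl/backtracking/permutation_sequence.py | permutation_sequence
-- ===== SOURCE A (Python) =====
-- import math
--
-- def permutation_sequence(n, k):
--     numbers = [x for x in range(1, n + 1)]
--     permutation = ''
--     k -= 1
--     while n:
--         n -= 1
--         index = k // math.factorial(n)
--         k %= math.factorial(n)
--         permutation += str(numbers[index])
--         numbers.remove(numbers[index])
--
--     return permutation
-- ===== SOURCE B (Python) =====
-- def permutation_sequence(n, k):
--     # Order-statistics segment tree over the values 1..n: each node stores how many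
--     # values in its range are still unused; selection descends from the root in
--     # O(log n), removal decrements the path.  Factorials are built once.
--     size = 1
--     while size < n:
--         size *= 2
--     tree = [0] * (2 * size)
--     for i in range(n):
--         tree[size + i] = 1
--     for i in range(size - 1, 0, -1):
--         tree[i] = tree[2 * i] + tree[2 * i + 1]
--     fact = [1]
--     for i in range(1, n):
--         fact.append(fact[i - 1] * i)
--     k -= 1
--     out = []
--     for m in range(n, 0, -1):
--         d = (k // fact[m - 1]) % m      # 0-based rank among the m remaining values
--         k %= fact[m - 1]
--         node = 1
--         while node < size:
--             node *= 2
--             if tree[node] <= d: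
--                 d -= tree[node]
--                 node += 1
--         out.append(str(node - size + 1))
--         while node:
--             tree[node] -= 1
--             node //= 2
--     return ''.join(out)
-- ===== Notes on version B (the rewrite author's own statement) =====
-- stated objective: faster
-- what changed: B replaces A's shrinking candidate list (index, then remove-by-value, with math.factorial recomputed from scratch twice per iteration) by an order-statistics segment tree: a binary tree of counts of still-unused values is built once, each output value is found by descending the tree in O(log n) and removed by decrementing its root-to-leaf path, and factorials are built once by one multiplication each.
import Mathlib
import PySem

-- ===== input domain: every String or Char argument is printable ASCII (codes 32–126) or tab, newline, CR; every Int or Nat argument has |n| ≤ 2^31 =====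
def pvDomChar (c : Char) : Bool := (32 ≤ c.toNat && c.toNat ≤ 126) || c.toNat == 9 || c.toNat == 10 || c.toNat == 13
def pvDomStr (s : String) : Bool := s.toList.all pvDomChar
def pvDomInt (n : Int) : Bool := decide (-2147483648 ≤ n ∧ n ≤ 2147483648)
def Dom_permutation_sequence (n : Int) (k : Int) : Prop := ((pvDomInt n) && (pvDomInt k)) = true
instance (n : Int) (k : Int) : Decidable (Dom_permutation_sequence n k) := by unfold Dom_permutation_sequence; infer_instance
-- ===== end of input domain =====

set_option maxHeartbeats 1000000


-- B replaces A's shrinking candidate list (index + remove-by-value, with math.factorial recomputed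
-- from scratch each iteration) by an order-statistics segment tree built once; objective: faster.

-- ===== PORT A =====
-- the 'while n:' loop of A, fuel = the (nonnegative) n; a Python IndexError (pyGet? = none) is outside Pre_
def pvLoopA : Nat → Int → List Int → String → String
  | 0, _, _, perm => perm
  | m + 1, k, nums, perm =>
    let f : Int := (Nat.factorial m : Int)
    let idx := PySem.Int.floordiv k f
    let k' := PySem.Int.mod k f
    match PySem.List.pyGet? nums idx with
    | none => perm
    | some v =>
      match PySem.List.remove? nums v with
      | none => perm
      | some nums' => pvLoopA m k' nums' (perm ++ PySem.Int.toStr v)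

def permutation_sequence (n : Int) (k : Int) : String :=
  pvLoopA n.toNat (k - 1) (PySem.List.pyRange 1 (n + 1) 1) ""

-- ===== PORT B =====
-- tree[i] read / write; every access B makes is in range, where getD/set are exact
def pvAtB (l : List Int) (i : Int) : Int := l.getD i.toNat 0
def pvSetB (l : List Int) (i : Int) (v : Int) : List Int := l.set i.toNat v

-- 'size = 1; while size < n: size *= 2'; fuel n.toNat always covers the <= log2(n) doublings
def pvGrowB (n : Int) : Nat → Int → Int
  | 0, s => s
  | fuel + 1, s => if s < n then pvGrowB n fuel (2 * s) else s

-- 'node = 1; while node < size: node *= 2; if tree[node] <= d: d -= tree[node]; node += 1';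
-- fuel size.toNat always covers the <= log2(size) doublings of node
def pvSelLoopB (size : Int) (t : List Int) : Nat → Int → Int → Int × Int
  | 0, node, d => (node, d)
  | fuel + 1, node, d =>
    if node < size then
      if pvAtB t (2 * node) ≤ d then pvSelLoopB size t fuel (2 * node + 1) (d - pvAtB t (2 * node))
      else pvSelLoopB size t fuel (2 * node) d
    else (node, d)

-- 'while node: tree[node] -= 1; node //= 2'; fuel node.toNat always covers the <= log2(node)+1 halvings
def pvDecLoopB : Nat → List Int → Int → List Int
  | 0, t, _ => t
  | fuel + 1, t, node =>
    if 0 < node then pvDecLoopB fuel (pvSetB t node (pvAtB t node - 1)) (PySem.Int.floordiv node 2)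
    else t

-- the body of B's main 'for m in range(n, 0, -1)' loop; state = (k, tree, out)
def pvStepB (size : Int) (fact : List Int) (s : Int × List Int × List String) (m : Int) :
    Int × List Int × List String :=
  let f := pvAtB fact (m - 1)
  let d := PySem.Int.mod (PySem.Int.floordiv s.1 f) m
  let k' := PySem.Int.mod s.1 f
  let node := (pvSelLoopB size s.2.1 size.toNat 1 d).1
  (k', pvDecLoopB node.toNat s.2.1 node, s.2.2 ++ [PySem.Int.toStr (node - size + 1)])

def permutation_sequence_alt (n : Int) (k : Int) : String :=
  let size := pvGrowB n n.toNat 1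
  let t0 : List Int := List.replicate (2 * size).toNat 0
  let t1 := (PySem.List.pyRange 0 n 1).foldl (fun t i => pvSetB t (size + i) 1) t0
  let t2 := (PySem.List.pyRange (size - 1) 0 (-1)).foldl
      (fun t i => pvSetB t i (pvAtB t (2 * i) + pvAtB t (2 * i + 1))) t1
  let fact := (PySem.List.pyRange 1 n 1).foldl (fun l i => l ++ [pvAtB l (i - 1) * i]) [(1 : Int)]
  let st := (PySem.List.pyRange n 0 (-1)).foldl (pvStepB size fact) (k - 1, t2, [])
  PySem.Str.join "" st.2.2

-- ===== PRECONDITION & SPEC =====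
-- Pre_ is exactly the set of inputs on which the Python A returns (elsewhere it raises: ValueError from
-- math.factorial for n < 0, IndexError when the first index (k-1)//(n-1)! falls outside [-n, n-1], i.e.
-- when k < 1 - n! or k > n!).  The '13 ≤ n' disjunct only keeps the instance cheap to evaluate: inside
-- Dom (|k| ≤ 2^31 < 13! - 1) the bound 1 - n! ≤ k ≤ n! holds automatically for n ≥ 13.
def Pre_permutation_sequence (n : Int) (k : Int) : Prop :=
  0 ≤ n ∧ (n = 0 ∨ 13 ≤ n ∨
    (1 - (Nat.factorial n.toNat : Int) ≤ k ∧ k ≤ (Nat.factorial n.toNat : Int)))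
instance (n : Int) (k : Int) : Decidable (Pre_permutation_sequence n k) := by
  unfold Pre_permutation_sequence; infer_instance

def pvWitness_permutation_sequence : Int × Int := (3, 2)

def Spec_permutation_sequence (n : Int) (k : Int) (out : String) : Prop := out = permutation_sequence_alt n k
instance (n : Int) (k : Int) (out : String) : Decidable (Spec_permutation_sequence n k out) := by
  unfold Spec_permutation_sequence; infer_instance

-- ===== CLAIM (what is proved, stated in full; the proofs are below) =====
def Claim_equal_permutation_sequence : Prop := ∀ (n : Int) (k : Int), Dom_permutation_sequence n k → Pre_permutation_sequence n k → Spec_permutation_sequence n k (permutation_sequence n k)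

-- ===== LEMMAS AND PROOFS =====

-- the common abstract loop: with m values remaining in the pool V, pick index
-- t = (k / (m-1)!) mod m, emit V[t], recurse on the pool without it
def pvGhost : Nat → Int → List Int → List String
  | 0, _, _ => []
  | m + 1, k, V =>
    let t := ((k / (Nat.factorial m : Int)) % ((m : Int) + 1)).toNat
    PySem.Int.toStr (V.getD t 0) :: pvGhost m (k % (Nat.factorial m : Int)) (V.eraseIdx t)

theorem pv_join_cons (a : String) (l : List String) :
    PySem.Str.join "" (a :: l) = a ++ PySem.Str.join "" l := by
  have h : PySem.Chars.join [] (a.toList :: l.map String.toList)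
      = a.toList ++ PySem.Chars.join [] (l.map String.toList) := by
    simp [PySem.Chars.join, List.intercalate]
    cases l <;> simp
  simp [PySem.Str.join, h]

-- ===== A's loop equals the abstract loop =====
theorem pv_loopA_eq (m : Nat) : ∀ (k : Int) (nums : List Int) (perm : String),
    -(Nat.factorial m : Int) ≤ k → k < (Nat.factorial m : Int) →
    nums.Nodup → nums.length = m →
    pvLoopA m k nums perm = perm ++ PySem.Str.join "" (pvGhost m k nums) := by
  induction m with
  | zero =>
    intro k nums perm _ _ _ _
    simp [pvLoopA, pvGhost, PySem.Str.join, PySem.Chars.join, List.intercalate]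
  | succ m ih =>
    intro k nums perm hlo hhi hnd hlen
    have hFm : (0 : Int) < (Nat.factorial m : Int) := by exact_mod_cast Nat.factorial_pos m
    have hfs : (Nat.factorial (m + 1) : Int) = ((m : Int) + 1) * (Nat.factorial m : Int) := by
      rw [Nat.factorial_succ]; push_cast; ring
    set F : Int := (Nat.factorial m : Int) with hF
    set idx : Int := k / F with hidx
    have hm1 : (0 : Int) < (m : Int) + 1 := by positivity
    have hidx_lt : idx < (m : Int) + 1 := by
      rw [hidx, Int.ediv_lt_iff_lt_mul hFm]
      calc k < (Nat.factorial (m+1) : Int) := hhi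
        _ = ((m : Int) + 1) * F := hfs
    have hidx_lo : -((m : Int) + 1) ≤ idx := by
      rw [hidx, Int.le_ediv_iff_mul_le hFm]
      calc -((m : Int) + 1) * F = -(((m : Int) + 1) * F) := by ring
        _ = -(Nat.factorial (m+1) : Int) := by rw [hfs]
        _ ≤ k := hlo
    set t : Int := idx % ((m : Int) + 1) with htdef
    have ht0 : 0 ≤ t := Int.emod_nonneg idx (ne_of_gt hm1)
    have htlt : t < (m : Int) + 1 := Int.emod_lt_of_pos idx hm1
    have htN : (t.toNat : Int) = t := Int.toNat_of_nonneg ht0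
    have htNlt : t.toNat < nums.length := by rw [hlen]; omega
    -- Python's nums[idx] (negative index wraps) is nums[t.toNat]
    have hget : PySem.List.pyGet? nums idx = some nums[t.toNat] := by
      rcases le_or_gt 0 idx with hpos | hneg
      · have hteq : t = idx := Int.emod_eq_of_lt hpos hidx_lt
        rw [PySem.List.pyGet?_eq_some_getElem nums hpos (by omega)]
        congr 2; omega
      · have h2 := Int.add_mul_emod_self_left (a := idx) (b := (m : Int) + 1) (c := 1)
        rw [mul_one] at h2
        have hteq : t = idx + ((m : Int) + 1) := by
          rw [htdef, ← h2, Int.emod_eq_of_lt (by omega) (by omega)]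
        have hkk : idx = -(((-idx).toNat : Int)) := by omega
        rw [hkk, PySem.List.pyGet?_neg_natCast nums ((-idx).toNat) (by omega) (by omega)]
        have hix : nums.length - (-idx).toNat = t.toNat := by omega
        rw [List.getElem?_eq_getElem (by omega)]
        simp [hix]
    have hvmem : nums[t.toNat] ∈ nums := List.getElem_mem _
    have hrem : PySem.List.remove? nums nums[t.toNat] = some (nums.eraseIdx t.toNat) := by
      rw [PySem.List.remove?_eq_some_erase nums nums[t.toNat] hvmem, List.Nodup.erase_getElem hnd]
    set k' : Int := k % F with hk'
    have hk'0 : 0 ≤ k' := Int.emod_nonneg k (ne_of_gt hFm)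
    have hk'lt : k' < F := Int.emod_lt_of_pos k hFm
    have hnd' : (nums.eraseIdx t.toNat).Nodup := hnd.eraseIdx _
    have hlen' : (nums.eraseIdx t.toNat).length = m := by
      simp [List.length_eraseIdx_of_lt htNlt, hlen]
    -- unfold one step of A
    have hA : pvLoopA (m + 1) k nums perm
        = pvLoopA m k' (nums.eraseIdx t.toNat) (perm ++ PySem.Int.toStr nums[t.toNat]) := by
      simp only [pvLoopA, PySem.Int.floordiv_eq_ediv_of_pos hFm, PySem.Int.mod_eq_emod_of_pos hFm,
        ← hF, ← hidx, ← hk', hget, hrem]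
    -- unfold one step of the abstract loop
    have hG : pvGhost (m + 1) k nums
        = PySem.Int.toStr nums[t.toNat] :: pvGhost m k' (nums.eraseIdx t.toNat) := by
      simp only [pvGhost, ← hF, ← hidx, ← htdef, ← hk']
      rw [List.getD_eq_getElem _ _ htNlt]
    rw [hA, ih k' _ _ (by omega) hk'lt hnd' hlen', hG, pv_join_cons, ← String.append_assoc]

-- ===== B: basic array lemmas =====
theorem pv_len_setB (t : List Int) (i v : Int) : (pvSetB t i v).length = t.length := by
  simp [pvSetB]

theorem pv_atB_setB (t : List Int) (i v j : Int) (hi : 0 ≤ i) (hj : 0 ≤ j) :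
    pvAtB (pvSetB t i v) j = if j = i ∧ i < (t.length : Int) then v else pvAtB t j := by
  simp only [pvAtB, pvSetB, List.getD, List.getElem?_set]
  by_cases h1 : i.toNat = j.toNat
  · by_cases h2 : i.toNat < t.length
    · rw [if_pos h1, if_pos h2,
        if_pos (show j = i ∧ i < (t.length : Int) from ⟨by omega, by omega⟩)]
      rfl
    · rw [if_pos h1, if_neg h2,
        if_neg (show ¬ (j = i ∧ i < (t.length : Int)) from fun hc => h2 (by omega))]
      rw [List.getElem?_eq_none (by omega)]
  · rw [if_neg h1, if_neg (show ¬ (j = i ∧ i < (t.length : Int)) from fun hc => h1 (by omega))]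

theorem pv_atB_replicate (N : Nat) (j : Int) : pvAtB (List.replicate N (0:Int)) j = 0 := by
  simp only [pvAtB, List.getD, List.getElem?_replicate]
  split_ifs <;> rfl

theorem pv_foldl_length {α : Type} (f : List Int → α → List Int)
    (h : ∀ acc x, (f acc x).length = acc.length) :
    ∀ (l : List α) (t : List Int), (l.foldl f t).length = t.length := by
  intro l
  induction l with
  | nil => intro t; rfl
  | cons x xs ih => intro t; rw [List.foldl_cons, ih, h]

-- ===== B: size = smallest power of two ≥ n =====
theorem pv_growB_spec (n : Int) : ∀ (fuel : Nat) (s : Int), 0 < s → (∃ e : Nat, s = (2:Int)^e) →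
    n ≤ s * 2^fuel →
    ∃ E : Nat, pvGrowB n fuel s = (2:Int)^E ∧ n ≤ (2:Int)^E := by
  intro fuel
  induction fuel with
  | zero =>
    rintro s hs ⟨e, he⟩ hn
    have hns : n ≤ s := by simpa using hn
    exact ⟨e, he, he ▸ hns⟩
  | succ fuel ih =>
    rintro s hs ⟨e, he⟩ hn
    by_cases h : s < n
    · simp only [pvGrowB, if_pos h]
      exact ih (2*s) (by omega) ⟨e+1, by rw [he, pow_succ]; ring⟩
        (le_of_le_of_eq hn (by rw [pow_succ]; ring))
    · simp only [pvGrowB, if_neg h]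
      exact ⟨e, he, he ▸ (by omega : n ≤ s)⟩

-- ===== B: counting =====
def pvCnt (R : List Int) (lo w : Int) : Int :=
  ((R.filter fun x => decide (lo ≤ x ∧ x < lo + w)).length : Int)

-- the tree invariant: every node j whose subtree covers [lo, lo + 2^e) holds the number of
-- remaining offsets in that window
def pvInv (size : Int) (t : List Int) (R : List Int) : Prop :=
  ∀ (e : Nat) (j lo : Int), 1 ≤ j → j * 2^e = size + lo → 0 ≤ lo → lo + 2^e ≤ size →
    pvAtB t j = pvCnt R lo (2^e)

theorem pv_cnt_nonneg (R : List Int) (lo w : Int) : 0 ≤ pvCnt R lo w := by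
  unfold pvCnt; positivity

theorem pv_filter_split (lo w w' : Int) (hw : 0 ≤ w) (hw' : 0 ≤ w') :
    ∀ (R : List Int), R.Pairwise (· < ·) →
      R.filter (fun x => decide (lo ≤ x ∧ x < lo + (w + w')))
        = R.filter (fun x => decide (lo ≤ x ∧ x < lo + w))
          ++ R.filter (fun x => decide (lo + w ≤ x ∧ x < lo + w + w')) := by
  intro R
  induction R with
  | nil => intro _; simp
  | cons x xs ih =>
    intro hp
    obtain ⟨hx, hxs⟩ := List.pairwise_cons.mp hp
    by_cases h1 : x < lo + w
    · have e3 : (decide (lo + w ≤ x ∧ x < lo + w + w')) = false := by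
        simp only [decide_eq_false_iff_not]
        rintro ⟨h, _⟩; omega
      by_cases h2 : lo ≤ x
      · have e1 : (decide (lo ≤ x ∧ x < lo + (w + w'))) = true := by
          simp only [decide_eq_true_eq]; omega
        have e2 : (decide (lo ≤ x ∧ x < lo + w)) = true := by
          simp only [decide_eq_true_eq]; omega
        rw [List.filter_cons, List.filter_cons, List.filter_cons,
          if_pos e1, if_pos e2, if_neg (fun hc => Bool.false_ne_true (e3 ▸ hc)), ih hxs,
          List.cons_append]
      · have e1 : (decide (lo ≤ x ∧ x < lo + (w + w'))) = false := by
          simp only [decide_eq_false_iff_not]; rintro ⟨h, _⟩; omega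
        have e2 : (decide (lo ≤ x ∧ x < lo + w)) = false := by
          simp only [decide_eq_false_iff_not]; rintro ⟨h, _⟩; omega
        rw [List.filter_cons, List.filter_cons, List.filter_cons,
          if_neg (fun hc => Bool.false_ne_true (e1 ▸ hc)),
          if_neg (fun hc => Bool.false_ne_true (e2 ▸ hc)),
          if_neg (fun hc => Bool.false_ne_true (e3 ▸ hc)), ih hxs]
    · push_neg at h1
      have hL : (x :: xs).filter (fun y => decide (lo ≤ y ∧ y < lo + w)) = [] := by
        rw [List.filter_eq_nil_iff]
        intro y hy
        simp only [decide_eq_true_eq, not_and, not_lt]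
        intro _
        rcases List.mem_cons.mp hy with rfl | hmem
        · omega
        · have := hx y hmem; omega
      rw [hL, List.nil_append]
      apply List.filter_congr
      intro y hy
      have hylo : lo + w ≤ y := by
        rcases List.mem_cons.mp hy with rfl | hmem
        · omega
        · have := hx y hmem; omega
      simp only [decide_eq_decide]
      constructor
      · rintro ⟨_, h⟩; exact ⟨hylo, by omega⟩
      · rintro ⟨_, h⟩; exact ⟨by omega, by omega⟩

theorem pv_cnt_split (R : List Int) (lo w w' : Int) (hw : 0 ≤ w) (hw' : 0 ≤ w')
    (hp : R.Pairwise (· < ·)) :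
    pvCnt R lo (w + w') = pvCnt R lo w + pvCnt R (lo + w) w' := by
  unfold pvCnt
  rw [pv_filter_split lo w w' hw hw' R hp, List.length_append]
  push_cast
  ring

theorem pv_cnt_erase (R : List Int) (p lo w : Int) (hp : p ∈ R) :
    pvCnt (R.erase p) lo w = pvCnt R lo w - (if lo ≤ p ∧ p < lo + w then 1 else 0) := by
  have hperm : List.Perm R (p :: R.erase p) := List.perm_cons_erase hp
  unfold pvCnt
  rw [List.Perm.length_eq (hperm.filter _)]
  simp only [List.filter_cons]
  by_cases h : lo ≤ p ∧ p < lo + w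
  · rw [if_pos (decide_eq_true h), if_pos h, List.length_cons]
    push_cast; ring
  · rw [if_neg (fun hc => h (of_decide_eq_true hc)), if_neg h]
    ring

-- ===== B: the removal loop decrements exactly the root-to-leaf path =====
def pvOnPath (f j : Int) : Prop := ∃ i : Nat, f / (2:Int)^i = j

theorem pv_onPath_le (f j : Int) (hf : 0 ≤ f) (h : pvOnPath f j) : j ≤ f := by
  obtain ⟨i, hi⟩ := h
  rw [← hi]
  exact Int.ediv_le_self _ hf

theorem pv_ediv_two_pow (f : Int) (i : Nat) : f / 2 / (2:Int)^i = f / 2^(i+1) := by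
  rw [Int.ediv_ediv_of_nonneg (by norm_num : (0:Int) ≤ 2)]
  congr 1
  rw [pow_succ]; ring

theorem pv_onPath_split (f j : Int) (hf : 0 < f) (hj : 1 ≤ j) :
    pvOnPath f j ↔ j = f ∨ pvOnPath (f / 2) j := by
  constructor
  · rintro ⟨i, hi⟩
    cases i with
    | zero => left; simpa using hi.symm
    | succ i => right; exact ⟨i, by rw [pv_ediv_two_pow]; exact hi⟩
  · rintro (rfl | ⟨i, hi⟩)
    · exact ⟨0, by simp⟩
    · exact ⟨i+1, by rw [← pv_ediv_two_pow]; exact hi⟩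

theorem pv_dec_at : ∀ (fn : Nat) (t : List Int) (f : Int), f.toNat ≤ fn → 0 ≤ f →
    f < (t.length : Int) → ∀ j : Int, 1 ≤ j →
    (pvOnPath f j → pvAtB (pvDecLoopB fn t f) j = pvAtB t j - 1)
    ∧ (¬ pvOnPath f j → pvAtB (pvDecLoopB fn t f) j = pvAtB t j) := by
  intro fn
  induction fn with
  | zero =>
    intro t f hfn hf0 hlen j hj
    have hf : f = 0 := by omega
    subst hf
    constructor
    · rintro ⟨i, hi⟩
      rw [Int.zero_ediv] at hi
      omega
    · intro _; rfl
  | succ fn ih =>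
    intro t f hfn hf0 hlen j hj
    by_cases hf : 0 < f
    · simp only [pvDecLoopB, if_pos hf,
        PySem.Int.floordiv_eq_ediv_of_pos (by norm_num : (0:Int) < 2)]
      have hlen1 : (pvSetB t f (pvAtB t f - 1)).length = t.length := pv_len_setB t f _
      have hih := ih (pvSetB t f (pvAtB t f - 1)) (f/2) (by omega) (by omega)
        (by rw [hlen1]; omega) j hj
      have hset := pv_atB_setB t f (pvAtB t f - 1) j hf0 (by omega)
      have hsplit := pv_onPath_split f j hf hj
      constructor
      · intro hp
        by_cases hjf : j = f
        · subst hjf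
          have hnp : ¬ pvOnPath (j/2) j := fun hp' => by
            have := pv_onPath_le (j/2) j (by omega) hp'
            omega
          rw [hih.2 hnp, hset, if_pos ⟨rfl, hlen⟩]
        · have hp2 : pvOnPath (f/2) j := by
            rcases hsplit.mp hp with h | h
            · exact absurd h hjf
            · exact h
          rw [hih.1 hp2, hset, if_neg (fun hc => hjf hc.1)]
      · intro hp
        have hjf : j ≠ f := fun h => hp (hsplit.mpr (Or.inl h))
        have hp2 : ¬ pvOnPath (f/2) j := fun h => hp (hsplit.mpr (Or.inr h))
        rw [hih.2 hp2, hset, if_neg (fun hc => hjf hc.1)]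
    · have hf0' : f = 0 := by omega
      subst hf0'
      have hstop : pvDecLoopB (fn+1) t 0 = t := by simp [pvDecLoopB]
      rw [hstop]
      constructor
      · rintro ⟨i, hi⟩
        rw [Int.zero_ediv] at hi
        omega
      · intro _; rfl

theorem pv_dec_len : ∀ (fn : Nat) (t : List Int) (f : Int),
    (pvDecLoopB fn t f).length = t.length := by
  intro fn
  induction fn with
  | zero => intro t f; rfl
  | succ fn ih =>
    intro t f
    by_cases hf : 0 < f
    · simp only [pvDecLoopB, if_pos hf]
      rw [ih, pv_len_setB]
    · simp only [pvDecLoopB, if_neg hf]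

theorem pv_pow_lt_pow (a b : Nat) (h : (2:Int)^a < 2^b) : a < b := by
  by_contra hc
  push_neg at hc
  exact absurd (pow_le_pow_right₀ (by norm_num : (1:Int) ≤ 2) hc) (by omega)

theorem pv_onPath_iff (size p : Int) (e : Nat) (j lo : Int)
    (hj : 1 ≤ j) (hjlo : j * 2^e = size + lo) (hlo : 0 ≤ lo) (hhi : lo + 2^e ≤ size)
    (hp0 : 0 ≤ p) (hps : p < size) :
    pvOnPath (size + p) j ↔ (lo ≤ p ∧ p < lo + 2^e) := by
  have hBpos : (0:Int) < 2^e := by positivity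
  constructor
  · rintro ⟨i, hi⟩
    have hApos : (0:Int) < 2^i := by positivity
    have h1 : j * 2^i ≤ size + p := (Int.le_ediv_iff_mul_le hApos).mp (le_of_eq hi.symm)
    have h2 : size + p < (j+1) * 2^i := by
      refine (Int.ediv_lt_iff_lt_mul hApos).mp ?_
      rw [hi]; omega
    have hsz : size ≤ j * 2^e := by linarith
    have c1 : (2:Int)^i < 2 * 2^e := by
      have h4 : j * 2^i < j * (2 * 2^e) := by
        calc j * 2^i ≤ size + p := h1
          _ < 2 * size := by linarith
          _ ≤ 2 * (j * 2^e) := by linarith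
          _ = j * (2 * 2^e) := by ring
      exact lt_of_mul_lt_mul_left h4 (by omega : (0:Int) ≤ j)
    have c2 : (2:Int)^e < 2 * 2^i := by
      have h5 : (j+1) * 2^e ≤ 2 * size := by
        have : (j+1) * 2^e = j * 2^e + 2^e := by ring
        linarith
      have h6 : size < (j+1) * 2^i := by linarith
      have h7 : (j+1) * 2^e < (j+1) * (2 * 2^i) := by
        calc (j+1) * 2^e ≤ 2 * size := h5
          _ < 2 * ((j+1) * 2^i) := by linarith
          _ = (j+1) * (2 * 2^i) := by ring
      exact lt_of_mul_lt_mul_left h7 (by omega : (0:Int) ≤ j+1)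
    have hie : i = e := by
      have hi1 : i < e + 1 := by
        apply pv_pow_lt_pow
        rw [pow_succ]
        linarith
      have hi2 : e < i + 1 := by
        apply pv_pow_lt_pow
        rw [pow_succ]
        linarith
      omega
    subst hie
    have hx : (j+1) * 2^i = j * 2^i + 2^i := by ring
    constructor <;> linarith
  · rintro ⟨h1, h2⟩
    refine ⟨e, ?_⟩
    have ha : j * 2^e ≤ size + p := by linarith
    have hb : size + p < (j+1) * 2^e := by
      have : (j+1) * 2^e = j * 2^e + 2^e := by ring
      linarith
    have hle : j ≤ (size+p)/2^e := (Int.le_ediv_iff_mul_le hBpos).mpr ha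
    have hlt : (size+p)/2^e < j+1 := (Int.ediv_lt_iff_lt_mul hBpos).mpr hb
    omega

-- an interior node of a window of width 2^(e+1) lies strictly below the leaves
theorem pv_node_lt (size j lo : Int) (e : Nat) (h1 : 1 ≤ j) (h2 : j * 2^(e+1) = size + lo)
    (h3 : 0 ≤ lo) (h4 : lo + 2^(e+1) ≤ size) : j < size := by
  have hW : (0:Int) < 2^(e+1) := by positivity
  have ha : (j+1) * 2^(e+1) = size + lo + 2^(e+1) := by rw [add_mul, one_mul, h2]
  have hb : size + lo + 2^(e+1) ≤ 2 * size := by linarith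
  have h2pow : (2:Int) ≤ 2^(e+1) := by
    calc (2:Int) = 2^1 := (pow_one 2).symm
      _ ≤ 2^(e+1) := pow_le_pow_right₀ (by norm_num) (by omega)
  have hszpos : (0:Int) < size := by linarith
  have hc : 2 * size ≤ size * 2^(e+1) := by nlinarith
  have : (j+1) * 2^(e+1) ≤ size * 2^(e+1) := by linarith
  have := le_of_mul_le_mul_right this hW
  omega

-- ===== B: the selection loop finds the d-th remaining offset =====
theorem pv_sel (size : Int) (t R : List Int) (hInv : pvInv size t R) :
    ∀ (e : Nat) (fuel : Nat) (node lo d : Int), e ≤ fuel → 1 ≤ node → node * 2^e = size + lo →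
      0 ≤ lo → lo + 2^e ≤ size → 0 ≤ d → d < pvCnt R lo (2^e) → R.Pairwise (· < ·) →
      (pvSelLoopB size t fuel node d).1
        = size + (R.filter fun x => decide (lo ≤ x ∧ x < lo + 2^e)).getD d.toNat 0 := by
  intro e
  induction e with
  | zero =>
    intro fuel node lo d hef h1 h2 h3 h4 h5 h6 hR
    have hnode : node = size + lo := by simpa using h2
    have hexit : pvSelLoopB size t fuel node d = (node, d) := by
      cases fuel with
      | zero => rfl
      | succ fuel => simp only [pvSelLoopB]; rw [if_neg (by omega)]
    rw [hexit]
    have hlenF : d.toNat < (R.filter fun x => decide (lo ≤ x ∧ x < lo + 2^0)).length := by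
      have h7 := h6
      unfold pvCnt at h7
      omega
    have hval : (R.filter fun x => decide (lo ≤ x ∧ x < lo + 2^0)).getD d.toNat 0 = lo := by
      rw [List.getD_eq_getElem _ _ hlenF]
      have hmem : (R.filter fun x => decide (lo ≤ x ∧ x < lo + 2^0))[d.toNat] ∈
          (R.filter fun x => decide (lo ≤ x ∧ x < lo + 2^0)) := List.getElem_mem _
      have hpred := List.of_mem_filter hmem
      rw [decide_eq_true_eq] at hpred
      have h20 : (2:Int)^0 = 1 := pow_zero 2
      omega
    rw [hval, hnode]
  | succ e ih =>
    intro fuel node lo d hef h1 h2 h3 h4 h5 h6 hR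
    obtain ⟨fuel', rfl⟩ : ∃ f', fuel = f' + 1 := ⟨fuel - 1, by omega⟩
    have hW : (0:Int) < 2^e := by positivity
    have hW2 : ((2:Int)^(e+1)) = 2^e + 2^e := by rw [pow_succ]; ring
    have hnode_lt : node < size := pv_node_lt size node lo e h1 h2 h3 h4
    simp only [pvSelLoopB]
    rw [if_pos hnode_lt]
    have hL : pvAtB t (2*node) = pvCnt R lo (2^e) := by
      apply hInv e (2*node) lo (by omega) ?_ h3 (by linarith)
      rw [← h2, pow_succ]; ring
    have hsplitC : pvCnt R lo (2^(e+1)) = pvCnt R lo (2^e) + pvCnt R (lo + 2^e) (2^e) := by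
      rw [hW2]; exact pv_cnt_split R lo _ _ (le_of_lt hW) (le_of_lt hW) hR
    have hFsplit : (R.filter fun x => decide (lo ≤ x ∧ x < lo + 2^(e+1)))
        = (R.filter fun x => decide (lo ≤ x ∧ x < lo + 2^e))
          ++ (R.filter fun x => decide (lo + 2^e ≤ x ∧ x < lo + 2^e + 2^e)) := by
      have h := pv_filter_split lo (2^e) (2^e) (le_of_lt hW) (le_of_lt hW) R hR
      rw [hW2]
      exact h
    have hAlen : ((R.filter fun x => decide (lo ≤ x ∧ x < lo + 2^e)).length : Int)
        = pvCnt R lo (2^e) := rfl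
    have hBlen : ((R.filter fun x => decide (lo + 2^e ≤ x ∧ x < lo + 2^e + 2^e)).length : Int)
        = pvCnt R (lo + 2^e) (2^e) := rfl
    have hLnn : 0 ≤ pvCnt R lo (2^e) := pv_cnt_nonneg R lo _
    by_cases hbr : pvAtB t (2*node) ≤ d
    · rw [if_pos hbr]
      rw [hL] at hbr ⊢
      have hrec := ih fuel' (2*node+1) (lo + 2^e) (d - pvCnt R lo (2^e)) (by omega) (by omega)
        (by rw [add_mul, one_mul, show 2*node*2^e = node * 2^(e+1) from by rw [pow_succ]; ring, h2]; ring)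
        (by linarith) (by linarith [hW2 ▸ h4]) (by omega) (by omega) hR
      rw [hrec]
      congr 1
      rw [hFsplit]
      have hdB : (d - pvCnt R lo (2^e)).toNat
          < (R.filter fun x => decide (lo + 2^e ≤ x ∧ x < lo + 2^e + 2^e)).length := by omega
      have hdAB : d.toNat < ((R.filter fun x => decide (lo ≤ x ∧ x < lo + 2^e))
          ++ (R.filter fun x => decide (lo + 2^e ≤ x ∧ x < lo + 2^e + 2^e))).length := by
        rw [List.length_append]; omega
      rw [List.getD_eq_getElem _ _ hdAB, List.getD_eq_getElem _ _ hdB]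
      rw [List.getElem_append_right (by omega)]
      congr 1
      omega
    · rw [if_neg hbr]
      rw [hL] at hbr
      push_neg at hbr
      have hrec := ih fuel' (2*node) lo d (by omega) (by omega)
        (by rw [show 2*node*2^e = node * 2^(e+1) from by rw [pow_succ]; ring, h2])
        h3 (by linarith [hW2 ▸ h4]) h5 (by omega) hR
      rw [hrec]
      congr 1
      rw [hFsplit]
      have hdA : d.toNat < (R.filter fun x => decide (lo ≤ x ∧ x < lo + 2^e)).length := by omega
      have hdAB : d.toNat < ((R.filter fun x => decide (lo ≤ x ∧ x < lo + 2^e))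
          ++ (R.filter fun x => decide (lo + 2^e ≤ x ∧ x < lo + 2^e + 2^e))).length := by
        rw [List.length_append]; omega
      rw [List.getD_eq_getElem _ _ hdAB, List.getD_eq_getElem _ _ hdA]
      rw [List.getElem_append_left hdA]

-- ===== B: building the tree =====
theorem pv_tree1_spec (size n : Int) (hn : 0 ≤ n) (hns : n ≤ size) :
    ∀ (m : Nat), (m:Int) ≤ n → ∀ j : Int, 0 ≤ j →
      pvAtB ((PySem.List.pyRange 0 (m:Int) 1).foldl (fun t i => pvSetB t (size + i) 1)
          (List.replicate (2*size).toNat 0)) j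
        = if size ≤ j ∧ j < size + (m:Int) then 1 else 0 := by
  intro m
  induction m with
  | zero =>
    intro _ j hj
    rw [show ((0:Nat):Int) = 0 from rfl, PySem.List.pyRange_one_eq_nil le_rfl]
    rw [List.foldl_nil, if_neg (by omega), pv_atB_replicate]
  | succ m ih =>
    intro hmn j hj
    have hm : ((m:Int)) ≤ n := by push_cast at hmn ⊢; omega
    have hrange : PySem.List.pyRange 0 ((m+1 : Nat):Int) 1
        = PySem.List.pyRange 0 (m:Int) 1 ++ [(m:Int)] := by
      push_cast
      exact PySem.List.pyRange_one_succ_right (by positivity)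
    rw [hrange, List.foldl_append, List.foldl_cons, List.foldl_nil]
    have hlenf : ((PySem.List.pyRange 0 (m:Int) 1).foldl (fun t i => pvSetB t (size + i) 1)
        (List.replicate (2*size).toNat 0)).length = (2*size).toNat := by
      rw [pv_foldl_length _ (fun acc x => pv_len_setB acc _ _), List.length_replicate]
    rw [pv_atB_setB _ _ _ j (by omega) hj, hlenf]
    push_cast
    by_cases hje : j = size + (m:Int)
    · rw [if_pos ⟨hje, by omega⟩, if_pos (by omega)]
    · rw [if_neg (fun hc => hje hc.1), ih hm j hj]
      split_ifs <;> omega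

-- the intended per-subtree count (recursively), used only in the build proof
def pvSc (size n j : Int) : Int :=
  if h : 0 < j ∧ j < size then pvSc size n (2*j) + pvSc size n (2*j+1)
  else if size ≤ j ∧ j < size + n then 1 else 0
termination_by (2*size - j).toNat
decreasing_by all_goals omega

theorem pv_tree2_gen (size n : Int) :
    ∀ (a : Nat) (t : List Int), (a:Int) < size → t.length = (2*size).toNat →
      (∀ j : Int, (a:Int) < j → pvAtB t j = pvSc size n j) →
      ∀ j : Int, 0 < j →
        pvAtB ((PySem.List.pyRange (a:Int) 0 (-1)).foldl
          (fun t i => pvSetB t i (pvAtB t (2*i) + pvAtB t (2*i+1))) t) j = pvSc size n j := by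
  intro a
  induction a with
  | zero =>
    intro t _ _ hup j hj
    rw [show ((0:Nat):Int) = 0 from rfl, PySem.List.pyRange_neg_one_eq_nil le_rfl, List.foldl_nil]
    exact hup j (by exact_mod_cast hj)
  | succ a ih =>
    intro t ha hlen hup j hj
    have hcons : PySem.List.pyRange ((a+1:Nat):Int) 0 (-1)
        = ((a:Int)+1) :: PySem.List.pyRange (a:Int) 0 (-1) := by
      push_cast
      rw [PySem.List.pyRange_neg_one_cons (by positivity)]
      norm_num
    rw [hcons, List.foldl_cons]
    apply ih
    · push_cast at ha; omega
    · rw [pv_len_setB]; exact hlen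
    · intro j' hj'
      rw [pv_atB_setB t _ _ j' (by positivity) (by omega)]
      by_cases hje : j' = (a:Int)+1
      · rw [if_pos ⟨hje, by rw [hlen]; push_cast at ha ⊢; omega⟩, hje]
        rw [hup (2*((a:Int)+1)) (by push_cast; omega), hup (2*((a:Int)+1)+1) (by push_cast; omega)]
        have hx : pvSc size n ((a:Int)+1)
            = pvSc size n (2*((a:Int)+1)) + pvSc size n (2*((a:Int)+1)+1) := by
          rw [pvSc, dif_pos ⟨by positivity, by push_cast at ha; omega⟩]
        rw [hx]
      · rw [if_neg (fun hc => hje hc.1)]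
        exact hup j' (by omega)
    · exact hj

theorem pv_sc_cnt (size n : Int) (hn0 : 0 ≤ n) (hns : n ≤ size) :
    ∀ (e : Nat) (j lo : Int), 1 ≤ j → j * 2^e = size + lo → 0 ≤ lo → lo + 2^e ≤ size →
      pvSc size n j = pvCnt (PySem.List.pyRange 0 n 1) lo (2^e) := by
  intro e
  induction e with
  | zero =>
    intro j lo h1 h2 h3 h4
    have hj : j = size + lo := by simpa using h2
    rw [pvSc, dif_neg (by omega)]
    have hcnt : pvCnt (PySem.List.pyRange 0 n 1) lo (2^0) = if lo < n then 1 else 0 := by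
      unfold pvCnt
      have hcong : (PySem.List.pyRange 0 n 1).filter (fun x => decide (lo ≤ x ∧ x < lo + 2^0))
          = (PySem.List.pyRange 0 n 1).filter (fun x => x == lo) := by
        apply List.filter_congr
        intro y hy
        have hby : (y == lo) = decide (y = lo) := by
          by_cases h : y = lo <;> simp [h]
        rw [hby]
        simp only [decide_eq_decide, pow_zero]
        omega
      rw [hcong]
      by_cases hlon : lo < n
      · have hmem : lo ∈ PySem.List.pyRange 0 n 1 := PySem.List.mem_pyRange_one.mpr ⟨h3, hlon⟩
        have hnd : (PySem.List.pyRange 0 n 1).Nodup := PySem.List.nodup_pyRange_one 0 n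
        rw [if_pos hlon, ← List.countP_eq_length_filter]
        have hone : (PySem.List.pyRange 0 n 1).count lo = 1 := List.count_eq_one_of_mem hnd hmem
        have hcp : (PySem.List.pyRange 0 n 1).countP (fun x : Int => x == lo)
            = (PySem.List.pyRange 0 n 1).count lo := rfl
        rw [hcp, hone]
        rfl
      · rw [if_neg hlon]
        have : (PySem.List.pyRange 0 n 1).filter (fun x => x == lo) = [] := by
          rw [List.filter_eq_nil_iff]
          intro y hy
          have hmy := PySem.List.mem_pyRange_one.mp hy
          simp only [beq_iff_eq, ne_eq]
          omega
        rw [this]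
        rfl
    rw [hcnt]
    split_ifs <;> omega
  | succ e ihe =>
    intro j lo h1 h2 h3 h4
    have hW : (0:Int) < 2^e := by positivity
    have hW2 : ((2:Int)^(e+1)) = 2^e + 2^e := by rw [pow_succ]; ring
    have hjlt : j < size := pv_node_lt size j lo e h1 h2 h3 h4
    rw [pvSc, dif_pos ⟨by omega, hjlt⟩]
    rw [ihe (2*j) lo (by omega) (by rw [← h2, pow_succ]; ring) h3 (by linarith [hW2 ▸ h4])]
    rw [ihe (2*j+1) (lo + 2^e) (by omega)
      (by rw [add_mul, one_mul, show 2*j*2^e = j * 2^(e+1) from by rw [pow_succ]; ring, h2]; ring)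
      (by linarith) (by linarith [hW2 ▸ h4])]
    rw [hW2]
    exact (pv_cnt_split _ lo _ _ (le_of_lt hW) (le_of_lt hW)
      (PySem.List.pairwise_lt_pyRange_one 0 n)).symm

-- ===== B: the factorial table =====
def pvFactL (j : Nat) : List Int := (List.range j).map (fun i => ((Nat.factorial i : Nat) : Int))

theorem pv_fact_build : ∀ (m : Nat), 1 ≤ m →
    (PySem.List.pyRange 1 (m:Int) 1).foldl (fun l i => l ++ [pvAtB l (i-1) * i]) [(1:Int)]
      = pvFactL m := by
  intro m
  induction m with
  | zero => intro h; omega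
  | succ m ih =>
    intro _
    by_cases hm : m = 0
    · subst hm
      rw [show ((1:Nat):Int) = 1 from rfl, PySem.List.pyRange_one_eq_nil le_rfl, List.foldl_nil]
      simp [pvFactL, List.range_one, Nat.factorial]
    · have hm1 : 1 ≤ m := by omega
      have hrange : PySem.List.pyRange 1 ((m+1:Nat):Int) 1
          = PySem.List.pyRange 1 (m:Int) 1 ++ [(m:Int)] := by
        push_cast
        exact PySem.List.pyRange_one_succ_right (by exact_mod_cast hm1)
      rw [hrange, List.foldl_append, ih hm1, List.foldl_cons, List.foldl_nil]
      have hacc : pvAtB (pvFactL m) ((m:Int) - 1) = (Nat.factorial (m-1) : Int) := by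
        unfold pvAtB pvFactL
        have ht : ((m:Int) - 1).toNat = m - 1 := by omega
        rw [ht, List.getD_eq_getElem _ _ (by simpa using by omega : m - 1 < ((List.range m).map
          (fun i => ((Nat.factorial i : Nat) : Int))).length)]
        simp
      rw [hacc]
      unfold pvFactL
      rw [List.range_succ, List.map_append]
      congr 1
      obtain ⟨m', rfl⟩ : ∃ m', m = m' + 1 := ⟨m-1, by omega⟩
      simp [Nat.factorial_succ]
      push_cast
      ring

theorem pv_eraseIdx_map (f : Int → Int) : ∀ (l : List Int) (i : Nat),
    (l.map f).eraseIdx i = (l.eraseIdx i).map f := by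
  intro l
  induction l with
  | nil => intro i; simp
  | cons x xs ih =>
    intro i
    cases i with
    | zero => simp
    | succ i => simp [ih i]

-- ===== B: the main loop equals the abstract loop =====
theorem pv_main (size : Int) (E : Nat) (hsE : size = 2^E) (n : Int) (hns : n ≤ size)
    (fact : List Int)
    (hfact : ∀ m : Nat, 1 ≤ m → (m:Int) ≤ n →
      pvAtB fact ((m:Int)-1) = (Nat.factorial (m-1) : Int)) :
    ∀ (m : Nat) (k : Int) (t R : List Int) (acc : List String),
      (m:Int) ≤ n →
      pvInv size t R → t.length = (2*size).toNat → R.Pairwise (· < ·) →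
      (∀ x ∈ R, 0 ≤ x ∧ x < n) → R.length = m →
      ((PySem.List.pyRange (m:Int) 0 (-1)).foldl (pvStepB size fact) (k, t, acc)).2.2
        = acc ++ pvGhost m k (R.map (· + 1)) := by
  intro m
  induction m with
  | zero =>
    intro k t R acc _ _ _ _ _ _
    rw [show ((0:Nat):Int) = 0 from rfl, PySem.List.pyRange_neg_one_eq_nil le_rfl, List.foldl_nil]
    simp [pvGhost]
  | succ m ih =>
    intro k t R acc hmn hInv hlen hR hmem hRlen
    have hcons : PySem.List.pyRange ((m+1:Nat):Int) 0 (-1)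
        = ((m:Int)+1) :: PySem.List.pyRange (m:Int) 0 (-1) := by
      push_cast
      rw [PySem.List.pyRange_neg_one_cons (by positivity)]
      norm_num
    rw [hcons, List.foldl_cons]
    have hfpos : (0:Int) < (Nat.factorial m : Int) := by exact_mod_cast Nat.factorial_pos m
    have hfa : pvAtB fact ((m:Int) + 1 - 1) = (Nat.factorial m : Int) := by
      have h := hfact (m+1) (by omega) (by push_cast at hmn ⊢; omega)
      push_cast at h
      simpa using h
    have hm1 : (0:Int) < (m:Int) + 1 := by positivity
    set d : Int := (k / (Nat.factorial m : Int)) % ((m:Int)+1) with hd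
    have hd0 : 0 ≤ d := Int.emod_nonneg _ (ne_of_gt hm1)
    have hdlt : d < (m:Int)+1 := Int.emod_lt_of_pos _ hm1
    have hstep : pvStepB size fact (k, t, acc) ((m:Int)+1)
        = (k % (Nat.factorial m : Int),
           pvDecLoopB ((pvSelLoopB size t size.toNat 1 d).1).toNat t
             ((pvSelLoopB size t size.toNat 1 d).1),
           acc ++ [PySem.Int.toStr ((pvSelLoopB size t size.toNat 1 d).1 - size + 1)]) := by
      unfold pvStepB
      simp only [hfa, PySem.Int.floordiv_eq_ediv_of_pos hfpos, PySem.Int.mod_eq_emod_of_pos hfpos,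
        PySem.Int.mod_eq_emod_of_pos hm1, ← hd]
    rw [hstep]
    have hEpos : (0:Int) < 2^E := by positivity
    have hfull : (R.filter fun x => decide (0 ≤ x ∧ x < 0 + 2^E)) = R := by
      rw [List.filter_eq_self]
      intro x hx
      have hxb := hmem x hx
      simp only [decide_eq_true_eq]
      constructor
      · omega
      · have : x < n := hxb.2
        rw [hsE] at hns
        omega
    have hcntfull : pvCnt R 0 (2^E) = (R.length : Int) := by
      unfold pvCnt
      rw [hfull]
    have hdcnt : d < pvCnt R 0 (2^E) := by
      rw [hcntfull, hRlen]
      push_cast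
      omega
    have hdR : d.toNat < R.length := by
      rw [hRlen]; omega
    have hElt : (E:Int) < 2^E := by exact_mod_cast Nat.lt_two_pow_self
    have hsel : (pvSelLoopB size t size.toNat 1 d).1 = size + R[d.toNat] := by
      have h := pv_sel size t R hInv E size.toNat 1 0 d (by omega) le_rfl (by rw [hsE]; ring)
        le_rfl (by rw [hsE]; omega) hd0 hdcnt hR
      rw [h, hfull, List.getD_eq_getElem _ _ hdR]
    set p : Int := R[d.toNat] with hp
    have hpmem : p ∈ R := List.getElem_mem _
    have hpb := hmem p hpmem
    have hps : p < size := by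
      have := hpb.2
      rw [hsE] at hns
      omega
    have hInv' : pvInv size (pvDecLoopB (size + p).toNat t (size + p)) (R.erase p) := by
      intro e j lo hj hjlo hlo hhi
      have hWe : (0:Int) < 2^e := pow_pos (by norm_num) e
      have hlt2 : j ≤ j * 2^e := le_mul_of_one_le_right (by omega) (by omega)
      have hdec := pv_dec_at (size+p).toNat t (size+p) le_rfl (by omega)
        (by rw [hlen]; omega) j hj
      have hiff := pv_onPath_iff size p e j lo hj hjlo hlo hhi (by omega) hps
      by_cases hq : lo ≤ p ∧ p < lo + 2^e
      · rw [hdec.1 (hiff.mpr hq), hInv e j lo hj hjlo hlo hhi,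
          pv_cnt_erase R p lo (2^e) hpmem, if_pos hq]
      · rw [hdec.2 (fun hc => hq (hiff.mp hc)), hInv e j lo hj hjlo hlo hhi,
          pv_cnt_erase R p lo (2^e) hpmem, if_neg hq]
        ring
    have hnd : R.Nodup := List.Pairwise.imp (fun h => ne_of_lt h) hR
    have herase : R.erase p = R.eraseIdx d.toNat := by
      rw [hp]
      exact hnd.erase_getElem d.toNat hdR
    have hRlen' : (R.eraseIdx d.toNat).length = m := by
      rw [List.length_eraseIdx_of_lt hdR, hRlen]
      omega
    have hmem' : ∀ x ∈ R.eraseIdx d.toNat, 0 ≤ x ∧ x < n :=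
      fun x hx => hmem x ((List.eraseIdx_sublist R d.toNat).subset hx)
    have hR' : (R.eraseIdx d.toNat).Pairwise (· < ·) := hR.sublist (List.eraseIdx_sublist _ _)
    rw [hsel, show size + p - size + 1 = p + 1 from by ring]
    rw [ih (k % (Nat.factorial m : Int)) (pvDecLoopB (size+p).toNat t (size+p)) (R.eraseIdx d.toNat)
      (acc ++ [PySem.Int.toStr (p+1)]) (by push_cast at hmn ⊢; omega)
      (herase ▸ hInv') (by rw [pv_dec_len]; exact hlen) hR' hmem' hRlen']
    have hG : pvGhost (m+1) k (R.map (· + 1))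
        = PySem.Int.toStr (p + 1)
          :: pvGhost m (k % (Nat.factorial m : Int)) ((R.eraseIdx d.toNat).map (· + 1)) := by
      simp only [pvGhost, ← hd]
      rw [pv_eraseIdx_map]
      rw [List.getD_eq_getElem _ _ (by rw [List.length_map]; exact hdR), List.getElem_map]
    rw [hG, List.append_assoc, List.singleton_append]

-- map bridge: A's pool [1..n] is B's offsets [0..n-1] shifted by one
theorem pv_map_shift (m : Nat) :
    (PySem.List.pyRange 0 (m:Int) 1).map (· + 1) = PySem.List.pyRange 1 ((m:Int)+1) 1 := by
  rw [PySem.List.pyRange_one 0 _, PySem.List.pyRange_one 1 _, List.map_map]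
  rw [show ((m:Int) - 0).toNat = m from by omega, show ((m:Int) + 1 - 1).toNat = m from by omega]
  apply List.map_congr_left
  intro a _
  simp [Function.comp]
  omega

-- ===== VERDICT (by name: the statement is the Claim_ definition above) =====
theorem permutation_sequence_spec : Claim_equal_permutation_sequence := by
  intro n k hD hP
  unfold Spec_permutation_sequence
  obtain ⟨hn, hcase⟩ := hP
  obtain ⟨m, rfl⟩ : ∃ m : Nat, n = (m:Int) := ⟨n.toNat, by omega⟩
  rw [Int.toNat_natCast] at hcase
  have hbound : m = 0 ∨ (1 ≤ m ∧ -(Nat.factorial m : Int) ≤ k - 1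
      ∧ k - 1 < (Nat.factorial m : Int)) := by
    rcases hcase with h0 | h13 | hb
    · left; exact_mod_cast h0
    · right
      have h13m : (13 : Nat) ≤ m := by exact_mod_cast h13
      have hge : (Nat.factorial 13 : Int) ≤ (Nat.factorial m : Int) := by
        exact_mod_cast Nat.factorial_le h13m
      have hval : (Nat.factorial 13 : Int) = 6227020800 := by norm_num [Nat.factorial]
      have hDk : -2147483648 ≤ k ∧ k ≤ 2147483648 := by
        unfold Dom_permutation_sequence pvDomInt at hD
        simp only [Bool.and_eq_true, decide_eq_true_eq] at hD
        exact hD.2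
      exact ⟨by omega, by omega, by omega⟩
    · by_cases hm0 : m = 0
      · left; exact hm0
      · right; exact ⟨by omega, by omega, by omega⟩
  rcases hbound with h0 | ⟨hm1, hlo, hhi⟩
  · subst h0
    have hA : permutation_sequence ((0:Nat):Int) k = "" := by
      unfold permutation_sequence
      norm_num [pvLoopA]
    have hB : permutation_sequence_alt ((0:Nat):Int) k = "" := by
      simp only [permutation_sequence_alt, Nat.cast_zero, Int.toNat_zero]
      norm_num [pvGrowB, PySem.List.pyRange_one_eq_nil, PySem.List.pyRange_neg_one_eq_nil]
      simp [PySem.Str.join, PySem.Chars.join, List.intercalate]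
    rw [hA, hB]
  · have hm2 : ((m:Int)) < 2^m := by exact_mod_cast Nat.lt_two_pow_self
    obtain ⟨E, hsize, hnsize⟩ :=
      pv_growB_spec (m:Int) m 1 one_pos ⟨0, by norm_num⟩ (by rw [one_mul]; exact le_of_lt hm2)
    -- A side
    have hAeq : permutation_sequence (m:Int) k
        = PySem.Str.join "" (pvGhost m (k-1) (PySem.List.pyRange 1 ((m:Int)+1) 1)) := by
      unfold permutation_sequence
      rw [Int.toNat_natCast]
      rw [pv_loopA_eq m (k-1) _ "" hlo hhi (PySem.List.nodup_pyRange_one 1 ((m:Int)+1))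
        (by rw [PySem.List.length_pyRange_one]; omega)]
      simp
    -- B side
    rw [hAeq]
    simp only [permutation_sequence_alt]
    rw [Int.toNat_natCast, hsize]
    set sz : Int := (2:Int)^E with hsz
    have hszpos : (0:Int) < sz := by rw [hsz]; positivity
    have hms : (m:Int) ≤ sz := by rw [hsz]; exact hnsize
    set T1 : List Int := (PySem.List.pyRange 0 (m:Int) 1).foldl (fun t i => pvSetB t (sz + i) 1)
      (List.replicate (2*sz).toNat 0) with hT1
    have hT1at : ∀ j : Int, 0 ≤ j →
        pvAtB T1 j = if sz ≤ j ∧ j < sz + (m:Int) then 1 else 0 := by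
      intro j hj
      rw [hT1]
      exact pv_tree1_spec sz (m:Int) (by positivity) hms m le_rfl j hj
    have hT1len : T1.length = (2*sz).toNat := by
      rw [hT1, pv_foldl_length _ (fun a x => pv_len_setB a _ _), List.length_replicate]
    set T2 : List Int := (PySem.List.pyRange (sz - 1) 0 (-1)).foldl
      (fun t i => pvSetB t i (pvAtB t (2*i) + pvAtB t (2*i+1))) T1 with hT2
    have hT2at : ∀ j : Int, 0 < j → pvAtB T2 j = pvSc sz (m:Int) j := by
      intro j hj
      rw [hT2, show sz - 1 = (((sz-1).toNat : Nat) : Int) from by omega]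
      refine pv_tree2_gen sz (m:Int) (sz-1).toNat T1 (by omega) hT1len ?_ j hj
      intro j' hj'
      rw [pvSc, dif_neg (by omega)]
      rw [hT1at j' (by omega)]
    have hInv0 : pvInv sz T2 (PySem.List.pyRange 0 (m:Int) 1) := by
      intro e j lo h1 h2 h3 h4
      rw [hT2at j (by omega)]
      exact pv_sc_cnt sz (m:Int) (by positivity) hms e j lo h1 h2 h3 h4
    have hT2len : T2.length = (2*sz).toNat := by
      rw [hT2, pv_foldl_length _ (fun a x => pv_len_setB a _ _)]
      exact hT1len
    set FACT : List Int := (PySem.List.pyRange 1 (m:Int) 1).foldl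
      (fun l i => l ++ [pvAtB l (i - 1) * i]) [(1:Int)] with hFACT
    have hFactEq : FACT = pvFactL m := by rw [hFACT]; exact pv_fact_build m hm1
    have hfact : ∀ mm : Nat, 1 ≤ mm → (mm:Int) ≤ (m:Int) →
        pvAtB FACT ((mm:Int)-1) = (Nat.factorial (mm-1) : Int) := by
      intro mm h1 h2
      have h2' : mm ≤ m := by exact_mod_cast h2
      rw [hFactEq]
      unfold pvAtB pvFactL
      have ht : ((mm:Int) - 1).toNat = mm - 1 := by omega
      rw [ht, List.getD_eq_getElem _ _ (by
        rw [List.length_map, List.length_range]; omega)]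
      simp
    have hmain := pv_main sz E hsz (m:Int) hms FACT hfact m (k-1) T2
      (PySem.List.pyRange 0 (m:Int) 1) [] le_rfl hInv0 hT2len
      (PySem.List.pairwise_lt_pyRange_one 0 (m:Int))
      (fun x hx => PySem.List.mem_pyRange_one.mp hx)
      (by rw [PySem.List.length_pyRange_one]; omega)
    rw [hmain, List.nil_append, pv_map_shift m]
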